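-- pv_equiv track=rewrite | github.com/TaDpoleO/Python-Education | Tinkoff/Tinkoff Winter Contest 2023/1.py | answer
-- ===== SOURCE A (Python) =====
-- from collections import defaultdict
--
-- def answer(letters):
--     word = {'T': 1, 'I': 1, 'N': 1, 'K': 1, 'O': 1, 'F': 2}
--     word_length = 7
--
--     if len(letters) != word_length: return False
--
--     curr_word = defaultdict(int)
--     for ch in letters:
--         curr_word[ch] += 1
--         if (ch not in word) or curr_word[ch] > word[ch]: return False
--
--     return True
-- ===== SOURCE B (Python) =====
-- def answer(letters):
--     return sorted(letters) == sorted('TINKOFF')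
-- ===== Notes on version B (the rewrite author's own statement) =====
-- stated objective: simpler
-- what changed: Replaces A's length guard plus incremental frequency-dict loop with early exit by a one-line sort-and-compare against sorted('TINKOFF').
import Mathlib
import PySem

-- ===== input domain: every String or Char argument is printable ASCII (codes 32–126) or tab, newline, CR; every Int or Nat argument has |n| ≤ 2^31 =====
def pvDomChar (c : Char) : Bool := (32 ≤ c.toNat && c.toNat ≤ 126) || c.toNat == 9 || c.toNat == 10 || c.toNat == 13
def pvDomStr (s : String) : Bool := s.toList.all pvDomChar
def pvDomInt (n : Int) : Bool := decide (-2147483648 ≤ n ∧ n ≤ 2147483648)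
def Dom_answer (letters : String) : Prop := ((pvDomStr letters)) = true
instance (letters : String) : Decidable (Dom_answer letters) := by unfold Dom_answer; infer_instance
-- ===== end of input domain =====

-- B replaces A's length guard + incremental frequency-dict loop (early exit) with a one-line sort-and-compare (objective: simpler).

-- ===== PORT A =====
-- word = {'T': 1, 'I': 1, 'N': 1, 'K': 1, 'O': 1, 'F': 2}
def pvWord : PySem.Dict Char Int :=
  (((((PySem.Dict.empty.insert 'T' 1).insert 'I' 1).insert 'N' 1).insert 'K' 1).insert 'O' 1).insert 'F' 2

-- the 'for ch in letters' loop with its early return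
def answerLoop : List Char → PySem.Dict Char Int → Bool
  | [], _ => true
  | ch :: rest, curr =>
    let curr' := curr.modify ch 0 (· + 1)          -- curr_word[ch] += 1 (defaultdict(int))
    if pvWord.contains ch = false ∨ curr'.getD ch 0 > pvWord.getD ch 0 then false
    else answerLoop rest curr'

def answer (letters : String) : Bool :=
  if PySem.Str.len letters ≠ 7 then false
  else answerLoop letters.toList PySem.Dict.empty

-- ===== PORT B =====
-- sorted(letters) == sorted('TINKOFF')
def answer_alt (letters : String) : Bool :=
  decide (PySem.List.sorted letters.toList (fun x => x) false
          = PySem.List.sorted "TINKOFF".toList (fun x => x) false)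

-- ===== PRECONDITION & SPEC =====
def Spec_answer (letters : String) (out : Bool) : Prop := out = answer_alt letters
instance (letters : String) (out : Bool) : Decidable (Spec_answer letters out) := by unfold Spec_answer; infer_instance

-- ===== CLAIM (what is proved, stated in full; the proofs are below) =====
def Claim_equal_answer : Prop := ∀ (letters : String), Dom_answer letters → Spec_answer letters (answer letters)

-- ===== LEMMAS AND PROOFS =====

def tinkoff : List Char := ['T', 'I', 'N', 'K', 'O', 'F', 'F']

lemma pvWord_contains (c : Char) : pvWord.contains c = decide (c ∈ tinkoff) := by
  simp only [pvWord, tinkoff, PySem.Dict.contains_insert, PySem.Dict.contains_empty]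
  rw [Bool.eq_iff_iff]
  simp only [Bool.or_eq_true, beq_iff_eq, decide_eq_true_eq, List.mem_cons, List.not_mem_nil,
    or_false]
  tauto

-- loop characterisation: true iff every char is allowed and its total count stays within the bound
lemma answerLoop_iff : ∀ (cs : List Char) (curr : PySem.Dict Char Int),
    answerLoop cs curr = true ↔
      ∀ c ∈ cs, c ∈ tinkoff ∧ curr.getD c 0 + (cs.count c : Int) ≤ pvWord.getD c 0 := by
  intro cs
  induction cs with
  | nil => intro curr; simp [answerLoop]
  | cons ch rest ih =>
    intro curr
    simp only [answerLoop, PySem.Dict.getD_modify_self]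
    split_ifs with h
    · simp only [false_iff]
      intro hall
      obtain ⟨hmem, hle⟩ := hall ch (List.mem_cons_self ..)
      rcases h with h | h
      · rw [pvWord_contains] at h; simp [hmem] at h
      · have h1 : 1 ≤ (ch :: rest).count ch := by
          rw [List.count_cons_self]; omega
        omega
    · push Not at h
      obtain ⟨hcont, hle⟩ := h
      rw [ih]
      constructor
      · intro hall c hc
        rcases List.mem_cons.mp hc with rfl | hc'
        · refine ⟨?_, ?_⟩
          · rw [pvWord_contains] at hcont; simpa using hcont
          · by_cases hmr : c ∈ rest
            · obtain ⟨_, hb⟩ := hall c hmr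
              rw [PySem.Dict.getD_modify_self] at hb
              simp [List.count_cons_self] at hb ⊢
              omega
            · have : rest.count c = 0 := List.count_eq_zero.mpr hmr
              simp [List.count_cons_self, this]
              omega
        · obtain ⟨hm, hb⟩ := hall c hc'
          rw [PySem.Dict.getD_modify] at hb
          refine ⟨hm, ?_⟩
          by_cases hch : c = ch
          · subst hch
            rw [if_pos rfl] at hb
            rw [List.count_cons_self]
            push_cast at hb ⊢
            omega
          · simp [hch] at hb
            rw [List.count_cons_of_ne (Ne.symm hch)]
            exact hb
      · intro hall c hc
        obtain ⟨hm, hb⟩ := hall c (List.mem_cons_of_mem _ hc)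
        rw [PySem.Dict.getD_modify]
        refine ⟨hm, ?_⟩
        by_cases hch : c = ch
        · subst hch; simp [List.count_cons_self] at hb ⊢; omega
        · simp [hch]
          rw [List.count_cons_of_ne (Ne.symm hch)] at hb
          exact hb

lemma length_eq_sum_counts : ∀ cs : List Char, (∀ c ∈ cs, c ∈ tinkoff) →
    cs.length = cs.count 'T' + cs.count 'I' + cs.count 'N' + cs.count 'K'
      + cs.count 'O' + cs.count 'F' := by
  intro cs
  induction cs with
  | nil => simp
  | cons a l ih =>
    intro h
    simp only [List.mem_cons, forall_eq_or_imp] at h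
    obtain ⟨ha, hl⟩ := h
    have ihl := ih hl
    simp only [tinkoff, List.mem_cons, List.not_mem_nil, or_false] at ha
    rcases ha with rfl | rfl | rfl | rfl | rfl | rfl | rfl <;>
      simp <;> omega

lemma answer_true_iff (letters : String) :
    answer letters = true ↔ letters.toList.Perm tinkoff := by
  unfold answer
  have hlen : PySem.Str.len letters = (letters.toList.length : Int) := by
    simp [PySem.Str.len_eq]
  constructor
  · intro h
    split_ifs at h with h7
    have h7' : letters.toList.length = 7 := by omega
    rw [answerLoop_iff] at h
    have hmem : ∀ c ∈ letters.toList, c ∈ tinkoff := fun c hc => (h c hc).1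
    have hcnt : ∀ X : Char, X ∈ tinkoff → (letters.toList.count X : Int) ≤ pvWord.getD X 0 := by
      intro X hX
      by_cases hXc : X ∈ letters.toList
      · have := (h X hXc).2
        simpa [PySem.Dict.getD_empty] using this
      · have h0 : letters.toList.count X = 0 := List.count_eq_zero.mpr hXc
        rw [h0]
        simp only [tinkoff, List.mem_cons, List.not_mem_nil, or_false] at hX
        rcases hX with rfl | rfl | rfl | rfl | rfl | rfl | rfl <;> decide
    have bT := hcnt 'T' (by decide); have bI := hcnt 'I' (by decide)
    have bN := hcnt 'N' (by decide); have bK := hcnt 'K' (by decide)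
    have bO := hcnt 'O' (by decide); have bF := hcnt 'F' (by decide)
    have gT : pvWord.getD 'T' 0 = 1 := by decide
    have gI : pvWord.getD 'I' 0 = 1 := by decide
    have gN : pvWord.getD 'N' 0 = 1 := by decide
    have gK : pvWord.getD 'K' 0 = 1 := by decide
    have gO : pvWord.getD 'O' 0 = 1 := by decide
    have gF : pvWord.getD 'F' 0 = 2 := by decide
    rw [gT] at bT; rw [gI] at bI; rw [gN] at bN; rw [gK] at bK; rw [gO] at bO; rw [gF] at bF
    have hsum := length_eq_sum_counts letters.toList hmem
    have eT : letters.toList.count 'T' = 1 := by omega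
    have eI : letters.toList.count 'I' = 1 := by omega
    have eN : letters.toList.count 'N' = 1 := by omega
    have eK : letters.toList.count 'K' = 1 := by omega
    have eO : letters.toList.count 'O' = 1 := by omega
    have eF : letters.toList.count 'F' = 2 := by omega
    rw [List.perm_iff_count]
    intro a
    by_cases ha : a ∈ tinkoff
    · simp only [tinkoff, List.mem_cons, List.not_mem_nil, or_false] at ha
      rcases ha with rfl | rfl | rfl | rfl | rfl | rfl | rfl <;>
        simp [tinkoff, eT, eI, eN, eK, eO, eF]
    · have h1 : letters.toList.count a = 0 :=
        List.count_eq_zero.mpr (fun hc => ha (hmem a hc))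
      have h2 : tinkoff.count a = 0 := List.count_eq_zero.mpr ha
      rw [h1, h2]
  · intro hp
    have h7 : letters.toList.length = 7 := by rw [hp.length_eq]; rfl
    rw [if_neg (by omega)]
    rw [answerLoop_iff]
    intro c hc
    have hm : c ∈ tinkoff := hp.subset hc
    refine ⟨hm, ?_⟩
    rw [PySem.Dict.getD_empty]
    have hcc : letters.toList.count c = tinkoff.count c := List.perm_iff_count.mp hp c
    rw [hcc]
    simp only [tinkoff, List.mem_cons, List.not_mem_nil, or_false] at hm
    rcases hm with rfl | rfl | rfl | rfl | rfl | rfl | rfl <;> decide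

lemma answer_alt_true_iff (letters : String) :
    answer_alt letters = true ↔ letters.toList.Perm tinkoff := by
  unfold answer_alt
  rw [decide_eq_true_eq, PySem.List.sorted_id_eq_sorted_id_iff_perm]
  have : "TINKOFF".toList = tinkoff := by rfl
  rw [this]

-- ===== VERDICT (by name: the statement is the Claim_ definition above) =====
theorem answer_spec : Claim_equal_answer := by
  intro letters _
  unfold Spec_answer
  rw [Bool.eq_iff_iff, answer_true_iff, answer_alt_true_iff]
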